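-- pv_equiv track=rewrite | github.com/EleutherAI/tagged-pile | scripts/aligned_tokenize.py | uniform_chunks
-- ===== SOURCE A (Python) =====
-- from itertools import chain
--
-- def chunk(seq: list[int], chunk_size: int) -> list[list[int]]:
--     """Chunk a sequence into chunks of size `chunk_size`."""
--
--     return [
--         seq[i * chunk_size : (i + 1) * chunk_size]
--         for i in range(len(seq) // chunk_size)
--     ]
--
-- def uniform_chunks(
--     batch: dict[str, list], eos_id: int, eos_pos: int, chunk_size: int
-- ) -> dict[str, list]:
--     pos_iter = chain.from_iterable(ids + [eos_pos] for ids in batch["pos"])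
--     token_iter = chain.from_iterable(
--         ids + [eos_id] for ids in batch["input_ids"]
--     )
--     return {
--         "input_ids": chunk(list(token_iter), chunk_size),
--         "pos": chunk(list(pos_iter), chunk_size),
--     }
-- ===== SOURCE B (Python) =====
-- def uniform_chunks(batch, eos_id, eos_pos, chunk_size):
--     def emit(seqs, sep):
--         # Stream tokens, growing the current chunk element by element and
--         # emitting it as soon as it reaches chunk_size; the trailing partial
--         # chunk is discarded.
--         out = []
--         cur = []
--         for s in seqs:
--             for t in [*s, sep]:
--                 cur.append(t)
--                 if len(cur) == chunk_size:
--                     out.append(cur)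
--                     cur = []
--         return out
--
--     return {
--         "input_ids": emit(batch["input_ids"], eos_id),
--         "pos": emit(batch["pos"], eos_pos),
--     }
-- ===== Notes on version B (the rewrite author's own statement) =====
-- stated objective: alternative
-- what changed: Replaces flatten-the-whole-stream-then-index-slice (range of i*chunk_size slices) with a single streaming pass that grows the current chunk element by element and emits it the moment it reaches chunk_size, discarding the trailing partial chunk.
import Mathlib
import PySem

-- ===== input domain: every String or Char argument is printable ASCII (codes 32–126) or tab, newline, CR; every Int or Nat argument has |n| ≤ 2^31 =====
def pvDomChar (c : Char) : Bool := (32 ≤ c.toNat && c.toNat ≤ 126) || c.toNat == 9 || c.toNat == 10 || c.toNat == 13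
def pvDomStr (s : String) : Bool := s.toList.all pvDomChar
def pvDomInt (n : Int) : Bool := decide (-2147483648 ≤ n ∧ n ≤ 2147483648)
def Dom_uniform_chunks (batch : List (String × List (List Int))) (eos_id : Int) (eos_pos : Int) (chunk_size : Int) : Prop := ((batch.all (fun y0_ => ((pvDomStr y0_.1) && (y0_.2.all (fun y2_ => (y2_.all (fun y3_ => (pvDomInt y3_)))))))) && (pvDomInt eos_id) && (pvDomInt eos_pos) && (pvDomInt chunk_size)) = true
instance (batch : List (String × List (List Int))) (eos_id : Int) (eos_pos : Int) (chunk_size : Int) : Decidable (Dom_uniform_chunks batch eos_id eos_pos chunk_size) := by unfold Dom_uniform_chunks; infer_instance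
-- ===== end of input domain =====

-- B replaces A's flatten-then-index-slice chunking by one streaming pass that grows each
-- chunk element by element and emits it when it reaches chunk_size (objective: alternative).
-- Python's batch dict is an association list; batch["k"] is the first match.

-- ===== PORT A =====
-- batch["k"] (KeyError = none is excluded by Pre_; the default [] is never reached inside Pre_)
def pyLookup (batch : List (String × List (List Int))) (k : String) : List (List Int) :=
  ((batch.find? (fun p => p.1 == k)).map (·.2)).getD []

-- chunk(seq, chunk_size) = [seq[i*cs:(i+1)*cs] for i in range(len(seq)//cs)]
def chunkA (seq : List Int) (cs : Int) : List (List Int) :=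
  (PySem.List.pyRange 0 (PySem.Int.floordiv (seq.length : Int) cs) 1).map
    (fun i => PySem.List.slice seq (some (i * cs)) (some ((i + 1) * cs)))

def uniform_chunks (batch : List (String × List (List Int))) (eos_id : Int) (eos_pos : Int) (chunk_size : Int) : List (String × List (List Int)) :=
  let pos_iter := (pyLookup batch "pos").flatMap (fun ids => ids ++ [eos_pos])
  let token_iter := (pyLookup batch "input_ids").flatMap (fun ids => ids ++ [eos_id])
  [("input_ids", chunkA token_iter chunk_size), ("pos", chunkA pos_iter chunk_size)]

-- ===== PORT B =====
-- one token step of the streaming loop: append t to cur, emit cur when it reaches chunk_size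
def bStep (cs : Int) (st : List (List Int) × List Int) (t : Int) : List (List Int) × List Int :=
  let cur := st.2 ++ [t]
  if (cur.length : Int) = cs then (st.1 ++ [cur], []) else (st.1, cur)

-- emit(seqs, sep): for s in seqs: for t in [*s, sep]: …  (trailing partial cur discarded)
def bEmit (seqs : List (List Int)) (sep : Int) (cs : Int) : List (List Int) :=
  (seqs.foldl (fun st s => (s ++ [sep]).foldl (bStep cs) st) ([], [])).1

def uniform_chunks_alt (batch : List (String × List (List Int))) (eos_id : Int) (eos_pos : Int) (chunk_size : Int) : List (String × List (List Int)) :=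
  [("input_ids", bEmit (pyLookup batch "input_ids") eos_id chunk_size),
   ("pos", bEmit (pyLookup batch "pos") eos_pos chunk_size)]

-- ===== PRECONDITION & SPEC =====
-- Pre_ excludes exactly the inputs where Python A raises: a batch without an "input_ids" or
-- "pos" key (KeyError) and chunk_size = 0 (ZeroDivisionError in len//chunk_size).
def Pre_uniform_chunks (batch : List (String × List (List Int))) (eos_id : Int) (eos_pos : Int) (chunk_size : Int) : Prop :=
  chunk_size ≠ 0 ∧
  (batch.find? (fun p => p.1 == "input_ids")).isSome = true ∧
  (batch.find? (fun p => p.1 == "pos")).isSome = true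
instance (batch : List (String × List (List Int))) (eos_id : Int) (eos_pos : Int) (chunk_size : Int) : Decidable (Pre_uniform_chunks batch eos_id eos_pos chunk_size) := by unfold Pre_uniform_chunks; infer_instance

def pvWitness_uniform_chunks : (List (String × List (List Int))) × Int × Int × Int :=
  ([("input_ids", [[1, 2], [3]]), ("pos", [[0, 1], [0]])], -1, -1, 2)

def Spec_uniform_chunks (batch : List (String × List (List Int))) (eos_id : Int) (eos_pos : Int) (chunk_size : Int) (out : List (String × List (List Int))) : Prop := out = uniform_chunks_alt batch eos_id eos_pos chunk_size
instance (batch : List (String × List (List Int))) (eos_id : Int) (eos_pos : Int) (chunk_size : Int) (out : List (String × List (List Int))) : Decidable (Spec_uniform_chunks batch eos_id eos_pos chunk_size out) := by unfold Spec_uniform_chunks; infer_instance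

-- ===== CLAIM (what is proved, stated in full; the proofs are below) =====
def Claim_equal_uniform_chunks : Prop := ∀ (batch : List (String × List (List Int))) (eos_id : Int) (eos_pos : Int) (chunk_size : Int), Dom_uniform_chunks batch eos_id eos_pos chunk_size → Pre_uniform_chunks batch eos_id eos_pos chunk_size → Spec_uniform_chunks batch eos_id eos_pos chunk_size (uniform_chunks batch eos_id eos_pos chunk_size)

-- ===== LEMMAS AND PROOFS =====

-- reference chunking: peel off full chunks of size k, drop the partial tail
def chunksTD (k : Nat) (l : List Int) : List (List Int) :=
  if h : 0 < k ∧ k ≤ l.length then l.take k :: chunksTD k (l.drop k) else []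
termination_by l.length
decreasing_by simp only [List.length_drop]; omega

lemma chunksTD_nil_of_short (k : Nat) (l : List Int) (h : ¬ (0 < k ∧ k ≤ l.length)) :
    chunksTD k l = [] := by rw [chunksTD]; simp [h]

lemma chunksTD_cons (k : Nat) (c l : List Int) (hk : 0 < k) (hc : c.length = k) :
    chunksTD k (c ++ l) = c :: chunksTD k l := by
  rw [chunksTD]
  have hle : k ≤ (c ++ l).length := by simp [hc]
  rw [dif_pos (⟨hk, hle⟩ : 0 < k ∧ k ≤ (c ++ l).length)]
  rw [← hc, List.take_left, List.drop_left]

-- the streaming fold over a flat token list produces chunksTD, with the partial tail in .2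
lemma foldl_bStep_eq (cs : Int) (hcs : 0 < cs) :
    ∀ (L : List Int) (out : List (List Int)) (cur : List Int), (cur.length : Int) < cs →
      L.foldl (bStep cs) (out, cur) =
        (out ++ chunksTD cs.toNat (cur ++ L), (L.foldl (bStep cs) (out, cur)).2) := by
  intro L
  induction L with
  | nil =>
      intro out cur hcur
      simp only [List.foldl_nil]
      rw [chunksTD_nil_of_short _ _ (by simp only [List.append_nil]; omega)]
      simp
  | cons t L ih =>
      intro out cur hcur
      simp only [List.foldl_cons]
      by_cases h : ((cur ++ [t]).length : Int) = cs
      · have hstep : bStep cs (out, cur) t = (out ++ [cur ++ [t]], []) := by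
          simp only [bStep, h]; simp
        rw [hstep, ih (out ++ [cur ++ [t]]) [] (by simpa using hcs)]
        have hflat : cur ++ t :: L = (cur ++ [t]) ++ L := by simp
        rw [hflat, chunksTD_cons cs.toNat (cur ++ [t]) L (by omega) (by omega)]
        simp
      · have hstep : bStep cs (out, cur) t = (out, cur ++ [t]) := by
          simp only [bStep, h]; simp
        have hlen : (cur ++ [t]).length = cur.length + 1 := by simp
        rw [hlen] at h
        rw [hstep, ih out (cur ++ [t]) (by rw [hlen]; omega)]
        have hflat : cur ++ t :: L = (cur ++ [t]) ++ L := by simp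
        rw [hflat]

-- with a nonpositive chunk size the streaming loop never emits
lemma foldl_bStep_neg (cs : Int) (hcs : cs < 0) :
    ∀ (L : List Int) (out : List (List Int)) (cur : List Int),
      (L.foldl (bStep cs) (out, cur)).1 = out := by
  intro L
  induction L with
  | nil => intro out cur; simp
  | cons t L ih =>
      intro out cur
      have hstep : bStep cs (out, cur) t = (out, cur ++ [t]) := by
        simp only [bStep]
        rw [if_neg (by simp; omega)]
      simp only [List.foldl_cons, hstep, ih]

-- A's list-comprehension chunking, rewritten over Nat indices
lemma chunkA_natForm (seq : List Int) (k : Nat) (hk : 0 < k) :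
    chunkA seq ((k : Nat) : Int) =
      (List.range (seq.length / k)).map (fun i => (seq.drop (i * k)).take k) := by
  unfold chunkA
  have hdiv : PySem.Int.floordiv (seq.length : Int) ((k : Nat) : Int)
      = ((seq.length / k : Nat) : Int) := PySem.Int.floordiv_natCast _ _
  rw [hdiv, PySem.List.pyRange_one]
  simp only [Int.sub_zero, Int.toNat_natCast, List.map_map]
  apply List.map_congr_left
  intro i _
  simp only [Function.comp_apply, Int.zero_add]
  have h1 : ((i : Int)) * ((k : Nat) : Int) = (((i * k : Nat)) : Int) := by push_cast; ring
  have h2 : ((i : Int) + 1) * ((k : Nat) : Int) = (((i * k + k : Nat)) : Int) := by push_cast; ring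
  rw [h1, h2, PySem.List.slice_natCast]
  congr 1
  omega

-- the Nat-index comprehension equals the peel-off recursion
lemma natForm_eq_chunksTD (k : Nat) (hk : 0 < k) :
    ∀ (seq : List Int),
      (List.range (seq.length / k)).map (fun i => (seq.drop (i * k)).take k) = chunksTD k seq := by
  intro seq
  induction hn : seq.length using Nat.strong_induction_on generalizing seq with
  | _ n ih =>
    subst hn
    by_cases h : k ≤ seq.length
    · have hdl : (seq.drop k).length = seq.length - k := by simp
      have hdiv : seq.length / k = (seq.drop k).length / k + 1 := by
        obtain ⟨m, hm⟩ := Nat.exists_eq_add_of_le h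
        rw [hdl, hm, Nat.add_comm k m, Nat.add_div_right _ hk, Nat.add_sub_cancel]
      rw [hdiv, List.range_succ_eq_map, List.map_cons, List.map_map]
      rw [chunksTD, dif_pos ⟨hk, h⟩]
      congr 1
      · simp
      · rw [← ih (seq.drop k).length (by rw [hdl]; omega) (seq.drop k) rfl]
        apply List.map_congr_left
        intro i _
        simp only [Function.comp_apply, List.drop_drop, Nat.succ_eq_add_one]
        congr 2
        ring
    · rw [chunksTD_nil_of_short k seq (by omega)]
      have : seq.length / k = 0 := Nat.div_eq_of_lt (by omega)
      rw [this]; simp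

-- main per-key equality: A's chunk of the flattened stream = B's streaming emit
lemma emit_eq (seqs : List (List Int)) (sep cs : Int) (hcs : cs ≠ 0) :
    chunkA (seqs.flatMap (fun ids => ids ++ [sep])) cs = bEmit seqs sep cs := by
  have hflat : bEmit seqs sep cs =
      ((seqs.flatMap (fun ids => ids ++ [sep])).foldl (bStep cs) ([], [])).1 := by
    unfold bEmit
    rw [List.flatMap, List.foldl_flatten, List.foldl_map]
  rcases lt_or_gt_of_ne hcs with hneg | hpos
  · rw [hflat, foldl_bStep_neg cs hneg]
    unfold chunkA
    rw [PySem.List.pyRange_one_eq_nil]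
    · simp
    · have : PySem.Int.floordiv ((seqs.flatMap (fun ids => ids ++ [sep])).length : Int) cs ≤ 0 := by
        unfold PySem.Int.floordiv
        have h1 : ((seqs.flatMap (fun ids => ids ++ [sep])).length : Int) / cs ≤ 0 :=
          Int.ediv_nonpos_of_nonneg_of_nonpos (by positivity) (le_of_lt hneg)
        rw [Int.fdiv_eq_ediv]; split_ifs <;> omega
      omega
  · rw [hflat, foldl_bStep_eq cs hpos _ [] [] (by simpa using hpos)]
    simp only [List.nil_append]
    have hcast : cs = ((cs.toNat : Nat) : Int) := by omega
    rw [hcast, chunkA_natForm _ cs.toNat (by omega), natForm_eq_chunksTD cs.toNat (by omega),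
      Int.toNat_natCast]

-- ===== VERDICT (by name: the statement is the Claim_ definition above) =====
theorem uniform_chunks_spec : Claim_equal_uniform_chunks := by
  intro batch eos_id eos_pos chunk_size _ hpre
  unfold Spec_uniform_chunks uniform_chunks uniform_chunks_alt
  simp only
  rw [emit_eq _ _ _ hpre.1, emit_eq _ _ _ hpre.1]
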